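-- pv_equiv track=rewrite | github.com/Rainymax/KG | main.py | search_head_entity
-- ===== SOURCE A (Python) =====
-- def search_head_entity(kg: dict, question: str):
--     '''在KG中匹配问题中的实体，返回最大匹配的实体'''
--     head_entity = []
--     for entity in kg.keys():
--         if entity in question:
--             head_entity.append(entity)
--     if len(head_entity) == 0:
--         return None
--     head_entity.sort(key=lambda x: len(x), reverse=True)
--     return head_entity[0]
-- ===== SOURCE B (Python) =====
-- def search_head_entity(kg: dict, question: str):
--     '''One pass over the keys keeping the first strictly-longest match; no list, no sort.'''
--     best = None
--     for entity in kg: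
--         if entity in question and (best is None or len(entity) > len(best)):
--             best = entity
--     return best
-- ===== Notes on version B (the rewrite author's own statement) =====
-- stated objective: simpler
-- what changed: Instead of collecting all matching keys into a list and stably sorting it by length descending to take the head, B keeps a single running best in one pass, replacing it only on a strictly longer match (which reproduces the stable-sort tie-break).
import Mathlib
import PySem

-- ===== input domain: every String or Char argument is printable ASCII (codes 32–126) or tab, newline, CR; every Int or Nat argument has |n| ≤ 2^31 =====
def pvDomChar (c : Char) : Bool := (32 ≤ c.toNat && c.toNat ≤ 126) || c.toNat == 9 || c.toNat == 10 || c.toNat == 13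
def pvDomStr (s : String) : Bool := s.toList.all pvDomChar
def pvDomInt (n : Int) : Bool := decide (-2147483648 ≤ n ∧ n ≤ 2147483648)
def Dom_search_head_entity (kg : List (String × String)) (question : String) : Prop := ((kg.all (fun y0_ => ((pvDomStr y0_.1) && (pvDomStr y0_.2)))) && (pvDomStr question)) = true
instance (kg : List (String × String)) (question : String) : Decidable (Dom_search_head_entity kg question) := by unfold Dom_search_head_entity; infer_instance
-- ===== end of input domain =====

-- B replaces A's collect-matches-then-stable-sort-by-length with a single pass keeping the first strictly-longest matching key.


-- ===== PORT A =====
def search_head_entity (kg : List (String × String)) (question : String) : Option String :=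
  let head_entity := ((PySem.Dict.ofList kg).keys).foldl
      (fun acc entity => if PySem.Str.isIn entity question then acc ++ [entity] else acc) []
  if head_entity.length = 0 then none
  else PySem.List.pyGet? (PySem.List.sorted head_entity (fun x => PySem.Str.len x) true) 0

-- ===== PORT B =====
def search_head_entity_alt (kg : List (String × String)) (question : String) : Option String :=
  ((PySem.Dict.ofList kg).keys).foldl
    (fun best entity =>
      if PySem.Str.isIn entity question &&
         (match best with
          | none => true
          | some b => decide (PySem.Str.len b < PySem.Str.len entity))
      then some entity else best) none

-- ===== PRECONDITION & SPEC =====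
def Spec_search_head_entity (kg : List (String × String)) (question : String) (out : Option String) : Prop := out = search_head_entity_alt kg question
instance (kg : List (String × String)) (question : String) (out : Option String) : Decidable (Spec_search_head_entity kg question out) := by unfold Spec_search_head_entity; infer_instance

-- ===== CLAIM (what is proved, stated in full; the proofs are below) =====
def Claim_equal_search_head_entity : Prop := ∀ (kg : List (String × String)) (question : String), Dom_search_head_entity kg question → Spec_search_head_entity kg question (search_head_entity kg question)

-- ===== LEMMAS AND PROOFS =====

-- the running-best step used on the filtered list
def pvPick (q : String) (b : Option String) (x : String) : Option String :=
  match b with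
  | none => some x
  | some c => if PySem.Str.len c < PySem.Str.len x then some x else some c

-- head of the insertion-sort fold is exactly the running best
lemma head_foldl_insertBy (key : String → Int) :
    ∀ (l : List String) (acc : List String),
      (l.foldl (fun a x => PySem.List.insertBy (fun a b => decide (key b < key a)) x a) acc).head? =
      l.foldl (fun b x =>
        match b with
        | none => some x
        | some c => if key c < key x then some x else some c) acc.head? := by
  intro l
  induction l with
  | nil => intro acc; simp
  | cons x t ih =>
    intro acc
    rw [List.foldl_cons, List.foldl_cons, ih]
    congr 1
    cases acc with
    | nil => simp [PySem.List.insertBy]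
    | cons y ys =>
      simp only [PySem.List.insertBy, List.head?_cons]
      by_cases h : key y < key x <;> simp [h]

-- B's fold over all keys equals the pvPick fold over the filtered keys
lemma alt_eq_pick_filter (q : String) (l : List String) :
    l.foldl (fun best entity =>
      if PySem.Str.isIn entity q &&
         (match best with
          | none => true
          | some b => decide (PySem.Str.len b < PySem.Str.len entity))
      then some entity else best) none =
    (l.filter (fun e => PySem.Str.isIn e q)).foldl (pvPick q) none := by
  rw [List.foldl_filter]
  congr 1
  funext b x
  cases hx : PySem.Str.isIn x q <;> cases b <;> simp [pvPick]

-- ===== VERDICT (by name: the statement is the Claim_ definition above) =====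
theorem search_head_entity_spec : Claim_equal_search_head_entity := by
  intro kg question _
  show search_head_entity kg question = search_head_entity_alt kg question
  unfold search_head_entity search_head_entity_alt
  rw [alt_eq_pick_filter]
  have hfold := PySem.List.foldl_append_if (fun e => PySem.Str.isIn e question)
      (fun e => e) ((PySem.Dict.ofList kg).keys) []
  simp only [List.map_id'] at hfold
  simp only [hfold, List.nil_append]
  set f := List.filter (fun e => PySem.Str.isIn e question) (PySem.Dict.ofList kg).keys with hf
  by_cases h : f = []
  · simp [h]
  · have hlen : f.length ≠ 0 := by simpa using h
    simp only [hlen, if_false]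
    rw [PySem.List.sorted_rev_eq_foldl_insertBy]
    have hh := head_foldl_insertBy (fun x => PySem.Str.len x) f []
    simp only [List.head?_nil] at hh
    have hget : ∀ (l : List String), PySem.List.pyGet? l 0 = l.head? := by
      intro l; cases l <;> simp [PySem.List.pyGet?, PySem.List.pyIdx?]
    rw [hget, hh]
    rfl
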